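-- pv_equiv track=rewrite | github.com/YasmminClaudino/lab2018.2 | 04-quadrado.py | verificaColuna
-- ===== SOURCE A (Python) =====
-- def verificaColuna(quadrado,m, tamanho,linhaErrada):
--     j = 0
--     for linha in range(tamanho):
--         soma, i = 0,0
--         for coluna in range(tamanho):
--             soma += quadrado[i][j]
--             i += 1
--         if soma != m:
--             nErrado = quadrado[linhaErrada][j]
--             return nErrado
--         j+=1
--     return nErrado
-- ===== SOURCE B (Python) =====
-- def verificaColuna(quadrado, m, tamanho, linhaErrada):
--     # One row-major pass builds every column sum, then a single scan finds the first bad column.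
--     colSums = [0] * tamanho
--     for linha in range(tamanho):
--         row = quadrado[linha]
--         for j in range(tamanho):
--             colSums[j] += row[j]
--     for j in range(tamanho):
--         if colSums[j] != m:
--             nErrado = quadrado[linhaErrada][j]
--             return nErrado
--     return nErrado
-- ===== Notes on version B (the rewrite author's own statement) =====
-- stated objective: alternative
-- what changed: B replaces A's per-column rescans (column-major nested loops with early return) by one row-major pass that builds the whole table of column sums, followed by a single scan of that table for the first column whose sum differs from m.
-- outside the precondition, e.g. on verificaColuna([[1, 2], [3]], 0, 2, 0): A returns 1, B raises IndexError; on verificaColuna([[1, 1], [1, 1], [5]], 0, 2, 2): A returns 5, B returns 5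
import Mathlib
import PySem

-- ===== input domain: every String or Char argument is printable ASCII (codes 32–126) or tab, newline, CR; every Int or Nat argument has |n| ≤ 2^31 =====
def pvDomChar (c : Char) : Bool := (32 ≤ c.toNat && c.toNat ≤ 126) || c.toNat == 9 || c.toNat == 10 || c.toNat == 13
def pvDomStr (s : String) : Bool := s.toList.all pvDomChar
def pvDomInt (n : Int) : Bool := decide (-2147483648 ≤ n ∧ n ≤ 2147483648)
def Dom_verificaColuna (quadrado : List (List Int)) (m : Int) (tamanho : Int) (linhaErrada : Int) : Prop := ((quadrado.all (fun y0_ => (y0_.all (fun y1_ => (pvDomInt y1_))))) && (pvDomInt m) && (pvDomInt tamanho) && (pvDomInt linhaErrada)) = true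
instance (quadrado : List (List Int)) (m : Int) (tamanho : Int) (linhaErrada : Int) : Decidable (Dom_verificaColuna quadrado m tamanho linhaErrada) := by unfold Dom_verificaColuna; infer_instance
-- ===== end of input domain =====

-- B builds all column sums in one row-major pass and then scans that table once,
-- instead of A's column-major rescans with an early return; same cost, different shape.


-- ===== PORT A =====
-- inner loop: soma, i = 0, 0; for coluna in range(tamanho): soma += quadrado[i][j]; i += 1
-- (all indices here are nonnegative and in range inside Pre_, so getD is exact there)
def pvColSumA (quadrado : List (List Int)) (tamanho j : Nat) : Int :=
  (List.range tamanho).foldl (fun soma i => soma + ((quadrado.getD i []).getD j 0)) 0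

-- outer loop over j = 0 .. tamanho-1 with early return at the first bad column;
-- the [] case is Python's fall-through `return nErrado` (UnboundLocalError, outside Pre_)
def pvLoopA (quadrado : List (List Int)) (m : Int) (tamanho : Nat) (linhaErrada : Int) : List Nat → Int
  | [] => 0
  | j :: rest =>
    if pvColSumA quadrado tamanho j ≠ m then
      ((PySem.List.pyGet? quadrado linhaErrada).getD []).getD j 0
    else pvLoopA quadrado m tamanho linhaErrada rest

def verificaColuna (quadrado : List (List Int)) (m : Int) (tamanho : Int) (linhaErrada : Int) : Int :=
  pvLoopA quadrado m tamanho.toNat linhaErrada (List.range tamanho.toNat)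

-- ===== PORT B =====
-- colSums = [0]*tamanho; for linha in range(tamanho): for j in range(tamanho): colSums[j] += row[j]
def pvColSums (quadrado : List (List Int)) (tamanho : Nat) : List Int :=
  (List.range tamanho).foldl
    (fun colSums linha =>
      let row := quadrado.getD linha []
      (List.range tamanho).map (fun j => colSums.getD j 0 + row.getD j 0))
    (List.replicate tamanho 0)

-- for j in range(tamanho): if colSums[j] != m: … (first bad column index)
def pvFirstBad (m : Int) : List Int → Nat → Option Nat
  | [], _ => none
  | c :: rest, j => if c ≠ m then some j else pvFirstBad m rest (j + 1)

def verificaColuna_alt (quadrado : List (List Int)) (m : Int) (tamanho : Int) (linhaErrada : Int) : Int :=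
  match pvFirstBad m (pvColSums quadrado tamanho.toNat) 0 with
  | some j => ((PySem.List.pyGet? quadrado linhaErrada).getD []).getD j 0
  | none => 0   -- Python: UnboundLocalError, outside Pre_

-- ===== PRECONDITION & SPEC =====
-- Pre_ excludes inputs where Python A raises (tamanho ≤ 0, missing rows/cells, bad
-- linhaErrada, or every column summing to m → UnboundLocalError), and — because A
-- short-circuits at the first bad column while B reads every cell of the tamanho×tamanho
-- square and the whole linhaErrada row up to tamanho — it also requires the first tamanho
-- rows and the linhaErrada row to have at least tamanho entries; on ragged input below
-- that bound A can still return where B raises IndexError (see the cited examples).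
def Pre_verificaColuna (quadrado : List (List Int)) (m : Int) (tamanho : Int) (linhaErrada : Int) : Prop :=
  0 < tamanho ∧ tamanho ≤ (quadrado.length : Int) ∧
  (∀ row ∈ quadrado.take tamanho.toNat, tamanho ≤ (row.length : Int)) ∧
  -(quadrado.length : Int) ≤ linhaErrada ∧ linhaErrada < (quadrado.length : Int) ∧
  tamanho ≤ ((quadrado.getD (if linhaErrada < 0 then (linhaErrada + quadrado.length).toNat else linhaErrada.toNat) []).length : Int) ∧
  ∃ j < tamanho.toNat, ((List.range tamanho.toNat).map (fun i => (quadrado.getD i []).getD j 0)).sum ≠ m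
instance (quadrado : List (List Int)) (m : Int) (tamanho : Int) (linhaErrada : Int) : Decidable (Pre_verificaColuna quadrado m tamanho linhaErrada) := by unfold Pre_verificaColuna; infer_instance

def pvWitness_verificaColuna : List (List Int) × Int × Int × Int := ([[1, 1], [2, 2]], 2, 2, 0)

def Spec_verificaColuna (quadrado : List (List Int)) (m : Int) (tamanho : Int) (linhaErrada : Int) (out : Int) : Prop := out = verificaColuna_alt quadrado m tamanho linhaErrada
instance (quadrado : List (List Int)) (m : Int) (tamanho : Int) (linhaErrada : Int) (out : Int) : Decidable (Spec_verificaColuna quadrado m tamanho linhaErrada out) := by unfold Spec_verificaColuna; infer_instance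

-- ===== CLAIM (what is proved, stated in full; the proofs are below) =====
def Claim_equal_verificaColuna : Prop := ∀ (quadrado : List (List Int)) (m : Int) (tamanho : Int) (linhaErrada : Int), Dom_verificaColuna quadrado m tamanho linhaErrada → Pre_verificaColuna quadrado m tamanho linhaErrada → Spec_verificaColuna quadrado m tamanho linhaErrada (verificaColuna quadrado m tamanho linhaErrada)

-- ===== LEMMAS AND PROOFS =====

lemma pv_map_range_getD (n j : Nat) (g : Nat → Int) (h : j < n) :
    ((List.range n).map g).getD j 0 = g j := by
  simp [List.getD_eq_getElem?_getD, h]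

-- B's row-major accumulation equals, pointwise, A's per-column sums.
lemma pv_fold_acc (q : List (List Int)) (n : Nat) :
    ∀ (rows : List Nat) (g : Nat → Int),
      rows.foldl
        (fun colSums linha =>
          let row := q.getD linha []
          (List.range n).map (fun j => colSums.getD j 0 + row.getD j 0))
        ((List.range n).map g)
      = (List.range n).map
          (fun j => rows.foldl (fun s i => s + ((q.getD i []).getD j 0)) (g j)) := by
  intro rows
  induction rows with
  | nil => intro g; rfl
  | cons r rest ih =>
    intro g
    simp only [List.foldl_cons]
    have hmap :
        (List.range n).map (fun j => ((List.range n).map g).getD j 0 + (q.getD r []).getD j 0)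
          = (List.range n).map (fun j => g j + (q.getD r []).getD j 0) := by
      apply List.map_congr_left
      intro j hj
      rw [pv_map_range_getD n j g (List.mem_range.mp hj)]
    rw [hmap, ih (fun j => g j + (q.getD r []).getD j 0)]

lemma pv_colSums_eq (q : List (List Int)) (n : Nat) :
    pvColSums q n = (List.range n).map (pvColSumA q n) := by
  unfold pvColSums pvColSumA
  have hrep : List.replicate n (0 : Int) = (List.range n).map (fun _ => 0) := by
    simp
  rw [hrep, pv_fold_acc q n (List.range n) (fun _ => 0)]

-- A's early-return column loop computes exactly "first bad index, then lookup".
lemma pv_loop_eq (q : List (List Int)) (m : Int) (n : Nat) (l : Int) :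
    ∀ (len a : Nat),
      pvLoopA q m n l (List.range' a len)
      = (match pvFirstBad m ((List.range' a len).map (pvColSumA q n)) a with
         | some j => ((PySem.List.pyGet? q l).getD []).getD j 0
         | none => 0) := by
  intro len
  induction len with
  | zero => intro a; rfl
  | succ k ih =>
    intro a
    rw [List.range'_succ]
    simp only [List.map_cons, pvLoopA, pvFirstBad]
    by_cases h : pvColSumA q n a ≠ m
    · simp [h]
    · simp [h, ih (a + 1)]

-- ===== VERDICT (by name: the statement is the Claim_ definition above) =====
theorem verificaColuna_spec : Claim_equal_verificaColuna := by
  intro q m t l _ _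
  unfold Spec_verificaColuna verificaColuna verificaColuna_alt
  rw [pv_colSums_eq, List.range_eq_range', pv_loop_eq q m t.toNat l t.toNat 0]
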